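/-
  WHAT jsmn_parse NEEDS OF THE STATE IT IS HANDED — the precondition of the refinement theorems, as a predicate on the model's state.

  jsmn_parse is re-entrant: after JSMN_ERROR_NOMEM (or JSMN_ERROR_PART) it is called again with the SAME parser struct and token array.
  Nothing in jsmn.h checks, on entry, that the parser's fields fit the array it is given; `Inv` is what must hold for every token access to
  be an access to `tokens[0, num_tokens)` and for every loop to end. A parser fresh from jsmn_init satisfies it (`SafeFacts.init`);
  jsmn_parse re-establishes it on every exit (`SafeFacts.parse`), so calling again with the same arguments is always allowed.
  Json/Jsmn/Terminates.lean says, conjunct by conjunct, which C expression needs it.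

  `SafeFacts` lists, as one `Prop`, the facts about the model the machine-level proofs use (each: "this function keeps `Inv`, and this is
  what it leaves in the fields the caller looks at next"); `Json/Jsmn/Safe.lean` proves it.
-/
import Json.Jsmn.Model

namespace Jsmn

/-- The part of `Inv` about the token array (absent in counting mode). -/
structure TokInv (cfg : Config) (p : Parser) (ts : Tokens) (numTokens : Nat) : Prop where
  /-- the array has `num_tokens` entries -/
  len : ts.length = numTokens
  /-- `num_tokens ≤ 2^31`: jsmn indexes tokens with `int`s (`for (i = parser->toknext - 1; i >= 0; i--)`, `toksuper = toknext - 1`): the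
  conversions from `unsigned int` mean what they say only below 2^31 -/
  small : numTokens ≤ 2147483648
  /-- the next token to allocate is inside the array, or just behind it: the backward scans start at `tokens[toknext - 1]`, and
  jsmn_alloc_token's check `toknext >= num_tokens` protects only the allocation itself -/
  toknext : p.toknext ≤ numTokens
  /-- `toksuper` is -1 or an index into the array (`tokens[parser->toksuper].size++` is guarded by `toksuper != -1` only); with parent
  links, of an allocated token (it becomes the new token's `parent`) -/
  superLo : -1 ≤ p.toksuper
  superHi : p.toksuper < (if cfg.parentLinks then (p.toknext : Int) else (numTokens : Int))
  /-- with JSMN_PARENT_LINKS: the parent link of every allocated token is -1 or points to an EARLIER token: the closing-bracket loop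
  `for (;;) { … token = &tokens[token->parent]; }` follows these links; going strictly down inside the array is what makes it end -/
  links : cfg.parentLinks = true → ∀ i, i < p.toknext → -1 ≤ (ts.getD i default).parent ∧ (ts.getD i default).parent < i

/-- **The precondition of jsmn_parse** (and its postcondition). -/
structure Inv (cfg : Config) (p : Parser) (toks : Option Tokens) (numTokens : Nat) : Prop where
  pos : p.pos < 4294967296
  toknextR : p.toknext < 4294967296
  superR : -2147483648 ≤ p.toksuper ∧ p.toksuper < 2147483648
  numR : numTokens < 4294967296
  toks : ∀ ts, toks = some ts → TokInv cfg p ts numTokens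

/-- A parser fresh from `jsmn_init` on an array of `num_tokens ≤ 2^31` tokens (any content), or in counting mode. -/
def Inv.Init (toks : Option Tokens) (numTokens : Nat) : Prop :=
  numTokens < 4294967296 ∧ ∀ ts, toks = some ts → ts.length = numTokens ∧ numTokens ≤ 2147483648

/-- The results jsmn_parse documents: a count, or one of the three error codes. -/
def IsResult (r : Int) : Prop := 0 ≤ r ∨ r = JSMN_ERROR_NOMEM ∨ r = JSMN_ERROR_INVAL ∨ r = JSMN_ERROR_PART

/-- The results of jsmn_parse_primitive / jsmn_parse_string: 0 or an error code. -/
def IsSubResult (r : Int) : Prop := r = 0 ∨ r = JSMN_ERROR_NOMEM ∨ r = JSMN_ERROR_INVAL ∨ r = JSMN_ERROR_PART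

/-- The facts about the model that the machine-level proofs take as hypotheses (proved in Json/Jsmn/Safe.lean: `safeFacts`). -/
structure SafeFacts (cfg : Config) : Prop where
  /-- jsmn_init establishes the invariant -/
  init : ∀ toks n, Inv.Init toks n → Inv cfg Parser.init toks n
  /-- jsmn_alloc_token: the fresh token is `tokens[toknext]`, inside the array; the invariant is kept -/
  alloc : ∀ p ts n i p' ts', Inv cfg p (some ts) n → allocToken cfg p ts n = some (i, p', ts') →
    i = p.toknext ∧ i < n ∧ p'.toknext = i + 1 ∧ p'.pos = p.pos ∧ p'.toksuper = p.toksuper ∧ Inv cfg p' (some ts') n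
  /-- jsmn_parse_primitive keeps the invariant and `toksuper`, and returns 0 or an error code -/
  prim : ∀ js fuel p toks n r p' toks', Inv cfg p toks n → parsePrimitive cfg js fuel p toks n = some (r, p', toks') →
    Inv cfg p' toks' n ∧ p'.toksuper = p.toksuper ∧ IsSubResult r ∧ (toks' = none ↔ toks = none)
  /-- jsmn_parse_string likewise -/
  str : ∀ js fuel p toks n r p' toks', Inv cfg p toks n → parseString cfg js fuel p toks n = some (r, p', toks') →
    Inv cfg p' toks' n ∧ p'.toksuper = p.toksuper ∧ IsSubResult r ∧ (toks' = none ↔ toks = none)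
  /-- `tokens[toksuper].size++` keeps the invariant -/
  bump : ∀ p toks n, Inv cfg p toks n → Inv cfg p (bumpSuper p toks) n
  /-- one trip through the body of jsmn_parse's loop keeps the invariant, whether it goes on or returns -/
  body : ∀ js fuel n s c, Inv cfg s.p s.toks n → -2147483648 ≤ s.count ∧ s.count < 2147483648 →
    (∀ s', body cfg js fuel n s c = some (.next s') → Inv cfg s'.p s'.toks n ∧ (-2147483648 ≤ s'.count ∧ s'.count < 2147483648) ∧ (s'.toks = none ↔ s.toks = none)) ∧
    (∀ r s', body cfg js fuel n s c = some (.ret r s') → Inv cfg s'.p s'.toks n ∧ (r = JSMN_ERROR_NOMEM ∨ r = JSMN_ERROR_INVAL ∨ r = JSMN_ERROR_PART) ∧ (s'.toks = none ↔ s.toks = none))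
  /-- jsmn_parse keeps the invariant -/
  parse : ∀ fuel js p toks n r p' toks', Inv cfg p toks n → parseFuel cfg fuel js p toks n = some (r, p', toks') →
    Inv cfg p' toks' n ∧ (toks' = none ↔ toks = none)

end Jsmn
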